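-- pv_equiv track=rewrite | github.com/bailichangchuan/mugame-mubo | routes/game.py | check_remote_attack_height
-- ===== SOURCE A (Python) =====
-- def check_remote_attack_height(state, fr, fc, tr, tc):
--     """
--     检查远程攻击路径上的高度差
--     如果攻击目标和棋子之间具有高度过高的区块或攻击目标较棋子很高，则无法攻击
--     计算公式：目标区块高度（中间区块高度）- 棋子所在格高度 > 2，则无法攻击
--
--     参数：
--     - state: 游戏状态
--     - fr, fc: 攻击者所在行、列
--     - tr, tc: 目标所在行、列
--
--     返回：
--     - (bool, str): (是否可以攻击, 错误信息)
--     """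
--     # 检查是否有地形高度数据
--     if 'terrain' not in state or 'height' not in state['terrain']:
--         return True, ""
--
--     terrain_height = state['terrain']['height']
--
--     # 检查坐标是否有效
--     if not (0 <= fr < len(terrain_height) and 0 <= fc < len(terrain_height[fr])):
--         return True, ""
--     if not (0 <= tr < len(terrain_height) and 0 <= tc < len(terrain_height[tr])):
--         return True, ""
--
--     # 获取攻击者所在格的高度
--     attacker_height = terrain_height[fr][fc]
--
--     # 检查攻击目标的高度
--     target_height = terrain_height[tr][tc]
--     if target_height - attacker_height > 2:
--         return False, f"目标高度过高，无法攻击！目标高度: {target_height}，攻击者高度: {attacker_height}，高度差: {target_height - attacker_height} > 2"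
--
--     # 检查路径上的所有中间区块的高度
--     if fr == tr: # 同一行
--         step = 1 if tc > fc else -1
--         for c in range(fc + step, tc, step):
--             if 0 <= c < len(terrain_height[fr]):
--                 mid_height = terrain_height[fr][c]
--                 if mid_height - attacker_height > 2:
--                     return False, f"路径上有高度过高的区块，无法攻击！中间区块高度: {mid_height}，攻击者高度: {attacker_height}，高度差: {mid_height - attacker_height} > 2"
--     elif fc == tc: # 同一列
--         step = 1 if tr > fr else -1
--         for r in range(fr + step, tr, step):
--             if 0 <= r < len(terrain_height) and 0 <= fc < len(terrain_height[r]):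
--                 mid_height = terrain_height[r][fc]
--                 if mid_height - attacker_height > 2:
--                     return False, f"路径上有高度过高的区块，无法攻击！中间区块高度: {mid_height}，攻击者高度: {attacker_height}，高度差: {mid_height - attacker_height} > 2"
--
--     return True, ""
-- ===== SOURCE B (Python) =====
-- def check_remote_attack_height(state, fr, fc, tr, tc):
--     # Declarative restructuring: build the ordered list of intermediate path heights
--     # by slicing the grid (row slice / column slice + ragged-row filter), then pick
--     # the first offender with next(); no index walking, no per-index bound checks.
--     if 'terrain' not in state or 'height' not in state['terrain']:
--         return True, ""
--     H = state['terrain']['height']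
--     if not (0 <= fr < len(H) and 0 <= fc < len(H[fr])):
--         return True, ""
--     if not (0 <= tr < len(H) and 0 <= tc < len(H[tr])):
--         return True, ""
--     ah = H[fr][fc]
--     th = H[tr][tc]
--     if th - ah > 2:
--         return False, f"目标高度过高，无法攻击！目标高度: {th}，攻击者高度: {ah}，高度差: {th - ah} > 2"
--     if fr == tr:
--         # both endpoints lie in row fr, so every index between them is in range
--         mids = H[fr][min(fc, tc) + 1:max(fc, tc)]
--         if tc < fc:
--             mids = mids[::-1]
--     elif fc == tc:
--         rows = H[min(fr, tr) + 1:max(fr, tr)]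
--         if tr < fr:
--             rows = rows[::-1]
--         mids = [row[fc] for row in rows if fc < len(row)]
--     else:
--         mids = []
--     bad = next((h for h in mids if h - ah > 2), None)
--     if bad is not None:
--         return False, f"路径上有高度过高的区块，无法攻击！中间区块高度: {bad}，攻击者高度: {ah}，高度差: {bad - ah} > 2"
--     return True, ""
-- ===== Notes on version B (the rewrite author's own statement) =====
-- stated objective: alternative
-- what changed: B replaces A's imperative index-walking loops (per-index bound checks, early return) by a staged declarative pipeline: it materialises the ordered list of intermediate path heights via grid slices (row slice / column slice with a ragged-row filter, reversed for negative direction) and then picks the first threshold offender from that list.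
import Mathlib
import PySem

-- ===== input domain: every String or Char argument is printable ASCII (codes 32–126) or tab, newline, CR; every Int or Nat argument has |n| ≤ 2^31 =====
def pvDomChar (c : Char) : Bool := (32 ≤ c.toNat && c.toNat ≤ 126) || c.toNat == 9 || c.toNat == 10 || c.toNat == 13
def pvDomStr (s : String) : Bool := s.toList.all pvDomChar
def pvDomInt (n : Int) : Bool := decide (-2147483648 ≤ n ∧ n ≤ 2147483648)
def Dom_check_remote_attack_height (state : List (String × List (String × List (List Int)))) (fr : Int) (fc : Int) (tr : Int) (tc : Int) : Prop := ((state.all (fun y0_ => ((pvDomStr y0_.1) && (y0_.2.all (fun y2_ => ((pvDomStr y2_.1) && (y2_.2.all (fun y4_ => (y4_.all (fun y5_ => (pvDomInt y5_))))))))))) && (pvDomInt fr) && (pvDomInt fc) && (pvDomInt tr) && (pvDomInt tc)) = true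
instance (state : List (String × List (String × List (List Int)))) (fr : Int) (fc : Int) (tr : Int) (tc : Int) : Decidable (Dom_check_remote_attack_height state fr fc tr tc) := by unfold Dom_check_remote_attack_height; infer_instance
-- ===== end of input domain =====

-- B rebuilds the check declaratively: it materialises the ordered list of intermediate path
-- heights by slicing the grid (row slice / column slice + ragged-row filter) and picks the
-- first offender from that list, instead of A's index-walking loops with per-index bound
-- checks (objective: alternative decomposition; same cost).

-- ===== PORT A =====

-- shared helpers: the guarded cell read and the two f-string messages
def pvCell (H : List (List Int)) (r c : Int) : Int :=
  PySem.List.pyGetD ((PySem.List.pyGet? H r).getD []) c 0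

def pvInGrid (H : List (List Int)) (r c : Int) : Bool :=
  decide (0 ≤ r) && decide (r < (H.length : Int)) &&
  decide (0 ≤ c) && decide (c < (((PySem.List.pyGet? H r).getD []).length : Int))

def pvMsgTarget (th ah : Int) : String :=
  "目标高度过高，无法攻击！目标高度: " ++ PySem.Int.toStr th ++ "，攻击者高度: " ++
  PySem.Int.toStr ah ++ "，高度差: " ++ PySem.Int.toStr (th - ah) ++ " > 2"

def pvMsgMid (mh ah : Int) : String :=
  "路径上有高度过高的区块，无法攻击！中间区块高度: " ++ PySem.Int.toStr mh ++ "，攻击者高度: " ++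
  PySem.Int.toStr ah ++ "，高度差: " ++ PySem.Int.toStr (mh - ah) ++ " > 2"

-- A's row loop: for c in range(fc+step, tc, step), per-cell check 0<=c<len(H[fr])
def pvScanRowA (H : List (List Int)) (fr ah : Int) : List Int → Option String
  | [] => none
  | c :: rest =>
    if decide (0 ≤ c) && decide (c < (((PySem.List.pyGet? H fr).getD []).length : Int)) then
      let mid := pvCell H fr c
      if mid - ah > 2 then some (pvMsgMid mid ah) else pvScanRowA H fr ah rest
    else pvScanRowA H fr ah rest

-- A's column loop: for r in range(fr+step, tr, step), per-cell check 0<=r<len(H) and 0<=fc<len(H[r])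
def pvScanColA (H : List (List Int)) (fc ah : Int) : List Int → Option String
  | [] => none
  | r :: rest =>
    if pvInGrid H r fc then
      let mid := pvCell H r fc
      if mid - ah > 2 then some (pvMsgMid mid ah) else pvScanColA H fc ah rest
    else pvScanColA H fc ah rest

def check_remote_attack_height (state : List (String × List (String × List (List Int)))) (fr : Int) (fc : Int) (tr : Int) (tc : Int) : Bool × String :=
  match List.lookup "terrain" state with
  | none => (true, "")
  | some terrain =>
    match List.lookup "height" terrain with
    | none => (true, "")
    | some H =>
      if !(pvInGrid H fr fc) then (true, "")
      else if !(pvInGrid H tr tc) then (true, "")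
      else
        let ah := pvCell H fr fc
        let th := pvCell H tr tc
        if th - ah > 2 then (false, pvMsgTarget th ah)
        else if fr = tr then
          let step : Int := if tc > fc then 1 else -1
          match pvScanRowA H fr ah (PySem.List.pyRange (fc + step) tc step) with
          | some msg => (false, msg)
          | none => (true, "")
        else if fc = tc then
          let step : Int := if tr > fr then 1 else -1
          match pvScanColA H fc ah (PySem.List.pyRange (fr + step) tr step) with
          | some msg => (false, msg)
          | none => (true, "")
        else (true, "")

-- ===== PORT B =====

-- Source B's staged construction of the ordered intermediate-height list (slices + filter)
def pvMidsB (H : List (List Int)) (fr fc tr tc : Int) : List Int :=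
  if fr = tr then
    if tc < fc then
      (PySem.List.slice ((PySem.List.pyGet? H fr).getD []) (some (min fc tc + 1)) (some (max fc tc))).reverse
    else
      PySem.List.slice ((PySem.List.pyGet? H fr).getD []) (some (min fc tc + 1)) (some (max fc tc))
  else if fc = tc then
    (if tr < fr then (PySem.List.slice H (some (min fr tr + 1)) (some (max fr tr))).reverse
     else PySem.List.slice H (some (min fr tr + 1)) (some (max fr tr))).filterMap (fun r =>
      if decide (fc < (r.length : Int)) then some (PySem.List.pyGetD r fc 0) else none)
  else []

def check_remote_attack_height_alt (state : List (String × List (String × List (List Int)))) (fr : Int) (fc : Int) (tr : Int) (tc : Int) : Bool × String :=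
  match List.lookup "terrain" state with
  | none => (true, "")
  | some terrain =>
    match List.lookup "height" terrain with
    | none => (true, "")
    | some H =>
      if !(pvInGrid H fr fc) then (true, "")
      else if !(pvInGrid H tr tc) then (true, "")
      else
        let ah := pvCell H fr fc
        let th := pvCell H tr tc
        if th - ah > 2 then (false, pvMsgTarget th ah)
        else
          match (pvMidsB H fr fc tr tc).find? (fun h => decide (h - ah > 2)) with
          | some bad => (false, pvMsgMid bad ah)
          | none => (true, "")

-- ===== PRECONDITION & SPEC =====
def Spec_check_remote_attack_height (state : List (String × List (String × List (List Int)))) (fr : Int) (fc : Int) (tr : Int) (tc : Int) (out : Bool × String) : Prop := out = check_remote_attack_height_alt state fr fc tr tc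
instance (state : List (String × List (String × List (List Int)))) (fr : Int) (fc : Int) (tr : Int) (tc : Int) (out : Bool × String) : Decidable (Spec_check_remote_attack_height state fr fc tr tc out) := by unfold Spec_check_remote_attack_height; infer_instance

-- ===== CLAIM (what is proved, stated in full; the proofs are below) =====
def Claim_equal_check_remote_attack_height : Prop := ∀ (state : List (String × List (String × List (List Int)))) (fr : Int) (fc : Int) (tr : Int) (tc : Int), Dom_check_remote_attack_height state fr fc tr tc → Spec_check_remote_attack_height state fr fc tr tc (check_remote_attack_height state fr fc tr tc)

-- ===== LEMMAS AND PROOFS =====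

-- A's row loop = first offender of the filtered cell list, wrapped in the message
theorem pvScanRowA_eq (H : List (List Int)) (fr ah : Int) (l : List Int) :
    pvScanRowA H fr ah l =
      Option.map (fun m => pvMsgMid m ah)
        ((l.filterMap (fun c =>
            if decide (0 ≤ c) && decide (c < (((PySem.List.pyGet? H fr).getD []).length : Int))
            then some (pvCell H fr c) else none)).find? (fun h => decide (h - ah > 2))) := by
  induction l with
  | nil => simp [pvScanRowA]
  | cons c rest ih =>
    simp only [pvScanRowA, List.filterMap_cons]
    by_cases hb : (decide (0 ≤ c) && decide (c < (((PySem.List.pyGet? H fr).getD []).length : Int))) = true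
    · rw [if_pos hb, if_pos hb]
      by_cases hm : pvCell H fr c - ah > 2
      · simp [hm]
      · simp only [List.find?_cons, if_neg hm]
        rw [show (decide (pvCell H fr c - ah > 2)) = false by simpa using hm]
        exact ih
    · rw [if_neg hb, if_neg hb]; exact ih

-- A's column loop = first offender of the filtered row list, wrapped in the message
theorem pvScanColA_eq (H : List (List Int)) (fc ah : Int) (l : List Int) :
    pvScanColA H fc ah l =
      Option.map (fun m => pvMsgMid m ah)
        ((l.filterMap (fun r =>
            if pvInGrid H r fc then some (pvCell H r fc) else none)).find?
          (fun h => decide (h - ah > 2))) := by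
  induction l with
  | nil => simp [pvScanColA]
  | cons r rest ih =>
    simp only [pvScanColA, List.filterMap_cons]
    by_cases hb : pvInGrid H r fc = true
    · rw [if_pos hb, if_pos hb]
      by_cases hm : pvCell H r fc - ah > 2
      · simp [hm]
      · simp only [List.find?_cons, if_neg hm]
        rw [show (decide (pvCell H r fc - ah > 2)) = false by simpa using hm]
        exact ih
    · rw [if_neg hb, if_neg hb]; exact ih

-- an in-bounds slice is the pointwise read along the index range
theorem pvSlice_eq_map {α : Type} (xs : List α) (d : α) (a b : Int)
    (ha : 0 ≤ a) (hb0 : 0 ≤ b) (hb : b ≤ (xs.length : Int)) :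
    PySem.List.slice xs (some a) (some b) =
      (PySem.List.pyRange a b 1).map (fun j => PySem.List.pyGetD xs j d) := by
  rw [PySem.List.slice_toNat xs ha hb0]
  by_cases hab : b ≤ a
  · rw [PySem.List.pyRange_one_eq_nil hab]
    simp [List.take_eq_nil_iff]
    omega
  · have hsplit := PySem.List.pyRange_one_append a b (xs.length : Int) (by omega) hb
    have hdrop := PySem.List.map_pyGetD_pyRange (xs := xs) (a := a) (d := d) ha
    rw [PySem.List.len_eq] at hdrop
    rw [← hdrop, hsplit, List.map_append]
    rw [List.take_left' (by rw [List.length_map, PySem.List.length_pyRange_one]; omega)]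

-- cells strictly between two in-range columns are in range, so the filter is a map
theorem pvFilterMap_all_some (row : List Int) (l : List Int)
    (hall : ∀ c ∈ l, 0 ≤ c ∧ c < (row.length : Int)) :
    l.filterMap (fun c =>
        if decide (0 ≤ c) && decide (c < (row.length : Int))
        then some (PySem.List.pyGetD row c 0) else none) =
      l.map (fun c => PySem.List.pyGetD row c 0) := by
  induction l with
  | nil => simp
  | cons c rest ih =>
    have hc := hall c (by simp)
    simp only [List.filterMap_cons, List.map_cons]
    rw [if_pos (by simp [hc.1, hc.2])]
    rw [ih (fun x hx => hall x (by simp [hx]))]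

-- both ports wrap the first offender in the same pair shape
theorem pvWrap (o : Option Int) (ah : Int) :
    (match Option.map (fun m => pvMsgMid m ah) o with
     | some msg => ((false : Bool), msg) | none => (true, "")) =
    (match o with
     | some bad => ((false : Bool), pvMsgMid bad ah) | none => (true, "")) := by
  cases o <;> rfl

-- ===== VERDICT (by name: the statement is the Claim_ definition above) =====
theorem check_remote_attack_height_spec : Claim_equal_check_remote_attack_height := by
  intro state fr fc tr tc _
  unfold Spec_check_remote_attack_height check_remote_attack_height check_remote_attack_height_alt
  cases List.lookup "terrain" state with
  | none => simp only []
  | some terrain =>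
    simp only []
    cases List.lookup "height" terrain with
    | none => simp only []
    | some H =>
      simp only []
      by_cases h1 : pvInGrid H fr fc = true
      case neg => simp [h1]
      by_cases h2 : pvInGrid H tr tc = true
      case neg => simp [h1, h2]
      simp only [h1, h2, Bool.not_true, Bool.false_eq_true, if_false]
      by_cases ht : pvCell H tr tc - pvCell H fr fc > 2
      · simp [ht]
      · simp only [if_neg ht]
        have h1' := h1; have h2' := h2
        simp only [pvInGrid, Bool.and_eq_true, decide_eq_true_eq] at h1' h2'
        obtain ⟨⟨⟨hfr0, hfrl⟩, hfc0⟩, hfcl⟩ := h1'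
        obtain ⟨⟨⟨htr0, htrl⟩, htc0⟩, htcl⟩ := h2'
        by_cases hr : fr = tr
        · subst hr
          unfold pvMidsB
          simp only [if_true]
          by_cases hcc : tc > fc
          · rw [if_pos hcc, pvScanRowA_eq]
            simp only [pvCell]
            have hmin : min fc tc = fc := by omega
            have hmax : max fc tc = tc := by omega
            rw [if_neg (by omega : ¬ tc < fc), hmin, hmax]
            rw [pvSlice_eq_map ((PySem.List.pyGet? H fr).getD []) 0 (fc + 1) tc
              (by omega) (by omega) (by omega)]
            rw [pvFilterMap_all_some ((PySem.List.pyGet? H fr).getD [])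
              (PySem.List.pyRange (fc + 1) tc 1) (fun c hc => by
                rw [PySem.List.mem_pyRange_one] at hc; exact ⟨by omega, by omega⟩)]
            exact pvWrap _ _
          · rw [if_neg hcc, pvScanRowA_eq]
            have hmin : min fc tc = tc := by omega
            have hmax : max fc tc = fc := by omega
            rw [hmin, hmax]
            by_cases heq : tc = fc
            · subst heq
              rw [if_neg (by omega : ¬ tc < tc)]
              rw [PySem.List.pyRange_neg_one_eq_nil (by omega)]
              rw [pvSlice_eq_map ((PySem.List.pyGet? H fr).getD []) 0 (tc + 1) tc
                (by omega) (by omega) (by omega)]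
              rw [PySem.List.pyRange_one_eq_nil (by omega)]
              simp
            · have hlt : tc < fc := by omega
              simp only [pvCell]
              rw [if_pos hlt]
              rw [show fc + -1 = (tc + 1) + ((fc - 1) - (tc + 1) + 1) - 1 by ring]
              rw [PySem.List.pyRange_neg_one_eq_reverse]
              rw [show (tc + 1) + ((fc - 1) - (tc + 1) + 1) - 1 = fc - 1 by ring,
                  show fc - 1 + 1 = fc by ring]
              rw [List.filterMap_reverse]
              rw [pvSlice_eq_map ((PySem.List.pyGet? H fr).getD []) 0 (tc + 1) fc
                (by omega) (by omega) (by omega)]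
              rw [pvFilterMap_all_some ((PySem.List.pyGet? H fr).getD [])
                (PySem.List.pyRange (tc + 1) fc 1) (fun c hc => by
                  rw [PySem.List.mem_pyRange_one] at hc; exact ⟨by omega, by omega⟩)]
              exact pvWrap _ _
        · simp only [if_neg hr]
          unfold pvMidsB
          rw [if_neg hr]
          by_cases hc : fc = tc
          · subst hc
            simp only [if_true]
            have hfun : ∀ a b : Int, 0 < a → b ≤ (H.length : Int) →
                (PySem.List.pyRange a b 1).filterMap (fun j =>
                  if decide (fc < ((PySem.List.pyGetD H j ([] : List Int)).length : Int))
                  then some (PySem.List.pyGetD (PySem.List.pyGetD H j ([] : List Int)) fc 0) else none) =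
                (PySem.List.pyRange a b 1).filterMap (fun j =>
                  if pvInGrid H j fc then some (pvCell H j fc) else none) := by
              intro a b ha hbl
              apply List.filterMap_congr
              intro j hj
              rw [PySem.List.mem_pyRange_one] at hj
              simp only [show PySem.List.pyGetD H j ([] : List Int)
                  = (PySem.List.pyGet? H j).getD [] from rfl]
              have hgrid : pvInGrid H j fc
                  = decide (fc < (((PySem.List.pyGet? H j).getD []).length : Int)) := by
                simp [pvInGrid, show (0:Int) ≤ j by omega, show j < (H.length:Int) by omega, hfc0]
              rw [hgrid, pvCell]
            by_cases hrr : tr > fr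
            · rw [if_pos hrr, pvScanColA_eq]
              have hmin : min fr tr = fr := by omega
              have hmax : max fr tr = tr := by omega
              rw [hmin, hmax, if_neg (by omega : ¬ tr < fr)]
              rw [pvSlice_eq_map H ([] : List Int) (fr + 1) tr (by omega) (by omega) (by omega)]
              rw [List.filterMap_map]
              rw [show ((fun r' : List Int =>
                    if decide (fc < (r'.length : Int)) then some (PySem.List.pyGetD r' fc 0) else none) ∘
                    (fun j => PySem.List.pyGetD H j ([] : List Int)))
                  = (fun j => if decide (fc < ((PySem.List.pyGetD H j ([] : List Int)).length : Int))
                      then some (PySem.List.pyGetD (PySem.List.pyGetD H j ([] : List Int)) fc 0)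
                      else none) from rfl]
              rw [hfun (fr + 1) tr (by omega) (by omega)]
              exact pvWrap _ _
            · have hlt : tr < fr := by omega
              rw [if_neg hrr, pvScanColA_eq]
              have hmin : min fr tr = tr := by omega
              have hmax : max fr tr = fr := by omega
              rw [hmin, hmax, if_pos hlt]
              rw [show fr + -1 = (tr + 1) + ((fr - 1) - (tr + 1) + 1) - 1 by ring]
              rw [PySem.List.pyRange_neg_one_eq_reverse]
              rw [show (tr + 1) + ((fr - 1) - (tr + 1) + 1) - 1 = fr - 1 by ring,
                  show fr - 1 + 1 = fr by ring]
              rw [List.filterMap_reverse]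
              rw [pvSlice_eq_map H ([] : List Int) (tr + 1) fr (by omega) (by omega) (by omega)]
              rw [List.filterMap_reverse, List.filterMap_map]
              rw [show ((fun r' : List Int =>
                    if decide (fc < (r'.length : Int)) then some (PySem.List.pyGetD r' fc 0) else none) ∘
                    (fun j => PySem.List.pyGetD H j ([] : List Int)))
                  = (fun j => if decide (fc < ((PySem.List.pyGetD H j ([] : List Int)).length : Int))
                      then some (PySem.List.pyGetD (PySem.List.pyGetD H j ([] : List Int)) fc 0)
                      else none) from rfl]
              rw [hfun (tr + 1) fr (by omega) (by omega)]
              exact pvWrap _ _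
          · simp [hc]
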